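-- pv_equiv track=rewrite | github.com/Teycir/BurpAPISecuritySuite | src/jython_size_helpers.py | _auth_replay_row_summary
-- ===== SOURCE A (Python) =====
-- def _auth_replay_row_summary(endpoint_findings, role_results):
--     if endpoint_findings:
--         severity_rank = {"critical": 0, "high": 1, "medium": 2}
--         sorted_findings = sorted(
--             endpoint_findings,
--             key=lambda x: severity_rank.get(
--                 (x.get("severity") or "medium").lower(), 3
--             ),
--         )
--         top = sorted_findings[0]
--         sev = (top.get("severity") or "medium").upper()
--         return "{} ({})".format(sev, len(endpoint_findings))
--     error_count = 0
--     for role_data in role_results.values():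
--         if role_data.get("error"):
--             error_count += 1
--     if error_count:
--         return "ERROR ({})".format(error_count)
--     return "OK"
-- ===== SOURCE B (Python) =====
-- def _auth_replay_row_summary(endpoint_findings, role_results):
--     if endpoint_findings:
--         severity_rank = {"critical": 0, "high": 1, "medium": 2}
--         best = endpoint_findings[0]
--         best_rank = severity_rank.get((best.get("severity") or "medium").lower(), 3)
--         for x in endpoint_findings[1:]:
--             r = severity_rank.get((x.get("severity") or "medium").lower(), 3)
--             if r < best_rank:
--                 best, best_rank = x, r
--         sev = (best.get("severity") or "medium").upper()
--         return "{} ({})".format(sev, len(endpoint_findings))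
--     error_count = sum(1 for rd in role_results.values() if rd.get("error"))
--     return "ERROR ({})".format(error_count) if error_count else "OK"
-- ===== Notes on version B (the rewrite author's own statement) =====
-- stated objective: alternative
-- what changed: The findings branch no longer sorts: a single best-so-far scan with strict '<' (first of a tie wins, matching the stable sort's head) picks the top finding, and the error count becomes a sum over a generator.
import Mathlib
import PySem

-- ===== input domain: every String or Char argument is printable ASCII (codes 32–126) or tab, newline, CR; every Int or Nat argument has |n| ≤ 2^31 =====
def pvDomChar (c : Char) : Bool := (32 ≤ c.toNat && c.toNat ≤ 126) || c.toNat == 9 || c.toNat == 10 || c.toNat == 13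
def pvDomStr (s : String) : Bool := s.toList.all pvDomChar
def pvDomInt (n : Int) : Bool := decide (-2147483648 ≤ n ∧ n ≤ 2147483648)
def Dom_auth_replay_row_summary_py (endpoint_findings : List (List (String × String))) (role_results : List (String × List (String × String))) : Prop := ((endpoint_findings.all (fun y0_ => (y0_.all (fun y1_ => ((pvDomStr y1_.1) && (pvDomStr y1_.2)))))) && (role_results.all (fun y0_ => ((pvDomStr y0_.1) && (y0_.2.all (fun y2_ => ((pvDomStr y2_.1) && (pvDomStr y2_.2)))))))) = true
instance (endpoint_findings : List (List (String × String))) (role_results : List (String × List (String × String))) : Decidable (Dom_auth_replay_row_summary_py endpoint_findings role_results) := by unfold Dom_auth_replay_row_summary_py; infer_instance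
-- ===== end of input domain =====

-- B replaces the stable sort of the findings branch by a single best-so-far scan (strict '<' keeps the first of any tie, matching the stable sort's head) and counts errors with a generator sum; an alternative O(n)-scan algorithm of similar measured cost.


-- ===== PORT A =====
-- d.get(k) on a Python dict passed in as an association list: first match (exact per the type convention)
def pvGetS (d : List (String × String)) (k : String) : Option String :=
  (d.find? (fun p => p.1 == k)).map (·.2)

-- (x.get("severity") or "medium"): None and "" are falsy
def pvSevRaw (d : List (String × String)) : String :=
  match pvGetS d "severity" with
  | none => "medium"
  | some s => if s = "" then "medium" else s

-- severity_rank.get((… ).lower(), 3)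
def pvRank (s : String) : Int :=
  match ([("critical", (0:Int)), ("high", 1), ("medium", 2)].find? (fun p => p.1 == s)) with
  | some p => p.2
  | none => 3

def pvKey (d : List (String × String)) : Int := pvRank (PySem.Str.lower (pvSevRaw d))

-- role_data.get("error") truthiness: a non-empty string
def pvErr (rd : List (String × String)) : Bool :=
  match pvGetS rd "error" with
  | some s => s ≠ ""
  | none => false

def auth_replay_row_summary_py (endpoint_findings : List (List (String × String))) (role_results : List (String × List (String × String))) : String :=
  if endpoint_findings ≠ [] then
    let sorted_findings := PySem.List.sorted endpoint_findings pvKey false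
    let top := PySem.List.pyGetD sorted_findings 0 []     -- sorted_findings[0]; in range: the list is nonempty here
    let sev := PySem.Str.upper (pvSevRaw top)
    sev ++ " (" ++ PySem.Int.toStr (endpoint_findings.length : Int) ++ ")"
  else
    let error_count : Int := (role_results.map Prod.snd).foldl (fun acc rd => if pvErr rd then acc + 1 else acc) 0
    if error_count ≠ 0 then "ERROR (" ++ PySem.Int.toStr error_count ++ ")" else "OK"

-- ===== PORT B =====
def auth_replay_row_summary_py_alt (endpoint_findings : List (List (String × String))) (role_results : List (String × List (String × String))) : String :=
  match endpoint_findings with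
  | x :: t =>
    let best := t.foldl (fun b y => let r := pvKey y; if r < b.2 then (y, r) else b) (x, pvKey x)
    PySem.Str.upper (pvSevRaw best.1) ++ " (" ++ PySem.Int.toStr ((x :: t).length : Int) ++ ")"
  | [] =>
    let error_count : Int := (role_results.countP (fun p => pvErr p.2) : Int)
    if error_count ≠ 0 then "ERROR (" ++ PySem.Int.toStr error_count ++ ")" else "OK"

-- ===== PRECONDITION & SPEC =====
def Spec_auth_replay_row_summary_py (endpoint_findings : List (List (String × String))) (role_results : List (String × List (String × String))) (out : String) : Prop := out = auth_replay_row_summary_py_alt endpoint_findings role_results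
instance (endpoint_findings : List (List (String × String))) (role_results : List (String × List (String × String))) (out : String) : Decidable (Spec_auth_replay_row_summary_py endpoint_findings role_results out) := by unfold Spec_auth_replay_row_summary_py; infer_instance

-- ===== CLAIM (what is proved, stated in full; the proofs are below) =====
def Claim_equal_auth_replay_row_summary_py : Prop := ∀ (endpoint_findings : List (List (String × String))) (role_results : List (String × List (String × String))), Dom_auth_replay_row_summary_py endpoint_findings role_results → Spec_auth_replay_row_summary_py endpoint_findings role_results (auth_replay_row_summary_py endpoint_findings role_results)

-- ===== LEMMAS AND PROOFS =====

-- the first-min scan over t starting from b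
def pvScan {α : Type} (k : α → Int) (t : List α) (b : α) : α :=
  t.foldl (fun b x => if k x < k b then x else b) b

-- inserting into a nonempty list: the new head is the smaller-key one, first of a tie staying
theorem insertBy_cons_head {α : Type} (k : α → Int) (x y : α) (ys : List α) :
    ∃ zs, PySem.List.insertBy (fun a b => decide (k a < k b)) x (y :: ys)
      = (if k x < k y then x else y) :: zs := by
  by_cases h : k x < k y
  · exact ⟨y :: ys, by simp [PySem.List.insertBy, h]⟩
  · exact ⟨PySem.List.insertBy (fun a b => decide (k a < k b)) x ys, by simp [PySem.List.insertBy, h]⟩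

theorem head_foldl_insertBy {α : Type} (k : α → Int) (t : List α) :
    ∀ (y : α) (ys : List α) (d : α),
    ((t.foldl (fun acc x => PySem.List.insertBy (fun a b => decide (k a < k b)) x acc) (y :: ys)).headD d)
      = pvScan k t y := by
  induction t with
  | nil => intro y ys d; simp [pvScan]
  | cons x t ih =>
    intro y ys d
    obtain ⟨zs, hz⟩ := insertBy_cons_head k x y ys
    rw [List.foldl_cons, hz, ih]
    simp [pvScan]

theorem head_sorted {α : Type} (k : α → Int) (x : α) (t : List α) (d : α) :
    (PySem.List.sorted (x :: t) k false).headD d = pvScan k t x := by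
  rw [PySem.List.sorted_eq_foldl_insertBy]
  simpa [PySem.List.insertBy] using head_foldl_insertBy k t x [] d

-- B's pair-valued fold carries the key of its best element alongside
theorem pair_fold_fst {α : Type} (k : α → Int) (t : List α) :
    ∀ (x : α),
    (t.foldl (fun b y => let r := k y; if r < b.2 then (y, r) else b) (x, k x)).1 = pvScan k t x := by
  induction t with
  | nil => intro x; simp [pvScan]
  | cons y t ih =>
    intro x
    simp only [List.foldl_cons, pvScan]
    by_cases h : k y < k x <;> simp [pvScan, h, ih]

-- ===== VERDICT (by name: the statement is the Claim_ definition above) =====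
theorem auth_replay_row_summary_py_spec : Claim_equal_auth_replay_row_summary_py := by
  intro ef rr _
  unfold Spec_auth_replay_row_summary_py auth_replay_row_summary_py auth_replay_row_summary_py_alt
  match ef with
  | [] =>
    simp only [ne_eq, not_true_eq_false, if_false]
    rw [PySem.List.foldl_if_add_one]
    have h2 : List.countP pvErr (List.map Prod.snd rr) = List.countP (fun p => pvErr p.2) rr := by
      rw [List.countP_map]; rfl
    rw [zero_add] at *
    simp only [h2]
  | x :: t =>
    simp only [ne_eq, reduceCtorEq, not_false_eq_true, if_true]
    rw [PySem.List.pyGetD_zero]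
    have h1 : (PySem.List.sorted (x :: t) pvKey false).getD 0 [] =
        (PySem.List.sorted (x :: t) pvKey false).headD [] := by
      cases hs : PySem.List.sorted (x :: t) pvKey false <;> simp
    rw [h1, head_sorted, pair_fold_fst]
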